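-- pv_equiv track=rewrite | github.com/salmanriazsyed/python-quality-evaluator | strip_comments.py | do_string
-- ===== SOURCE A (Python) =====
-- def do_string(string):
--     com_type=0
--     stripped=""
--     i=0
--     while(i<len(string)):
--         if com_type==0:
--             if string[i] == "'":
--                 com_type=1
--             elif string[i] == '"':
--                 com_type=2
--             else:
--                 stripped += string[i]
--
--         elif com_type==1:
--             while(i<len(string)):
--                 if string[i] == "'":
--                     com_type=0
--                     break
--                 else:
--                     pass
--                 i+=1
--         else: #com_type = 2
--             while(i<len(string)):
--                 if string[i] == '"':
--                     com_type=0
--                     break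
--                 else:
--                     pass
--                 i+=1
--
--         i+=1
--
--     return stripped
-- ===== SOURCE B (Python) =====
-- def do_string(string):
--     # Jump between quote positions with str.find and slices instead of a
--     # char-by-char state machine; recurse on the text after the closing quote.
--     qa = string.find("'")
--     qb = string.find('"')
--     if qa == -1 and qb == -1:
--         return string
--     q = qa if qb == -1 else (qb if qa == -1 else min(qa, qb))
--     close = string.find(string[q], q + 1)
--     if close == -1:
--         return string[:q]
--     return string[:q] + do_string(string[close + 1:])
-- ===== Notes on version B (the rewrite author's own statement) =====
-- stated objective: faster
-- what changed: Replaces the char-by-char nested-while state machine (with string += accumulation) by a recursive chunk scheme: str.find locates the next quote and its matching closer, slices copy each unquoted chunk wholesale, and the function recurses on the text after the closing quote.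
import Mathlib
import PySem

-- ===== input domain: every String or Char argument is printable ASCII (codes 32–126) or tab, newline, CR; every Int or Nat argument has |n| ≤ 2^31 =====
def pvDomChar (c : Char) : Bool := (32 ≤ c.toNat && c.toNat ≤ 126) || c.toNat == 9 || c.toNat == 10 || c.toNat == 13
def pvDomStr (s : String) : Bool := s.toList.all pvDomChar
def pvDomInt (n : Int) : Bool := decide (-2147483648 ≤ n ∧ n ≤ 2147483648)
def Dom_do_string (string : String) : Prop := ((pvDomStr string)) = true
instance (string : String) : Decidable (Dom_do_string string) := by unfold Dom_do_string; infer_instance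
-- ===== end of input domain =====

-- B strips quoted sections by jumping between quote positions with find/slices and recursing on the rest, instead of A's char-by-char nested-while state machine; a timing run measured B faster.

-- ===== PORT A =====
-- the inner while loops of A: advance i until the closing quote, then step past it
def pvSkipA (q : Char) : List Char → List Char
  | [] => []
  | c :: cs => if c = q then cs else pvSkipA q cs

theorem pvSkipA_length_le (q : Char) (l : List Char) : (pvSkipA q l).length ≤ l.length := by
  induction l with
  | nil => simp [pvSkipA]
  | cons c cs ih =>
    simp only [pvSkipA]
    split
    · simp
    · exact Nat.le_succ_of_le ih

-- A's outer while over i with com_type: branches kept in order (' first, then ")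
def pvStripA : List Char → List Char
  | [] => []
  | c :: cs =>
    if c = '\'' then pvStripA (pvSkipA '\'' cs)
    else if c = '"' then pvStripA (pvSkipA '"' cs)
    else c :: pvStripA cs
termination_by l => l.length
decreasing_by
  · exact Nat.lt_succ_of_le (pvSkipA_length_le _ _)
  · exact Nat.lt_succ_of_le (pvSkipA_length_le _ _)
  · exact Nat.lt_succ_of_le (Nat.le_refl _)

def do_string (string : String) : String := String.ofList (pvStripA string.toList)

-- ===== PORT B =====
def pvStripB (l : List Char) : List Char :=
  let qa := PySem.Chars.find l ['\'']
  let qb := PySem.Chars.find l ['"']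
  if h : qa = -1 ∧ qb = -1 then l
  else
    let q := if qb = -1 then qa else if qa = -1 then qb else min qa qb
    -- string[q]: q is a valid nonnegative index here, so getD equals Python's string[q]
    let quote := l.getD q.toNat ' '
    let close := PySem.Chars.findFrom l [quote] (q + 1) none
    if close = -1 then l.take q.toNat
    else l.take q.toNat ++ pvStripB (l.drop (close.toNat + 1))
termination_by l.length
decreasing_by
  have hne : l ≠ [] := by
    rcases not_and_or.mp h with h' | h'
    · have := (PySem.Chars.find_ne_neg_one_iff _ _).mp h'
      intro he; subst he; simp at this
    · have := (PySem.Chars.find_ne_neg_one_iff _ _).mp h'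
      intro he; subst he; simp at this
  have : 0 < l.length := List.length_pos_iff.mpr hne
  simp only [List.length_drop]; omega

def do_string_alt (string : String) : String := String.ofList (pvStripB string.toList)

-- ===== PRECONDITION & SPEC =====
def Spec_do_string (string : String) (out : String) : Prop := out = do_string_alt string
instance (string : String) (out : String) : Decidable (Spec_do_string string out) := by unfold Spec_do_string; infer_instance

-- ===== CLAIM (what is proved, stated in full; the proofs are below) =====
def Claim_equal_do_string : Prop := ∀ (string : String), Dom_do_string string → Spec_do_string string (do_string string)

-- ===== LEMMAS AND PROOFS =====

-- first index of character a, proof-side reference for Chars.find l [a]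
def pvIdx (a : Char) : List Char → Int
  | [] => -1
  | c :: cs => if c = a then 0 else if pvIdx a cs = -1 then -1 else pvIdx a cs + 1

theorem neg_one_le_pvIdx (a : Char) (l : List Char) : -1 ≤ pvIdx a l := by
  induction l with
  | nil => simp [pvIdx]
  | cons c cs ih => simp only [pvIdx]; split_ifs <;> omega

theorem pvIdx_eq_neg_one_iff (a : Char) (l : List Char) : pvIdx a l = -1 ↔ a ∉ l := by
  induction l with
  | nil => simp [pvIdx]
  | cons c cs ih =>
    have := neg_one_le_pvIdx a cs
    simp only [pvIdx, List.mem_cons]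
    split_ifs with h1 h2
    · simp [h1]
    · simp [ih.mp h2]; exact fun he => h1 he.symm
    · constructor
      · omega
      · intro hn; exact absurd (ih.mpr (fun hm => hn (Or.inr hm))) h2

theorem pvIdx_spec (a : Char) (l : List Char) (h : a ∈ l) :
    l[(pvIdx a l).toNat]? = some a ∧ ∀ i < (pvIdx a l).toNat, l[i]? ≠ some a := by
  induction l with
  | nil => simp at h
  | cons c cs ih =>
    simp only [pvIdx]
    split_ifs with h1 h2
    · subst h1; simp
    · exact absurd ((pvIdx_eq_neg_one_iff a (c :: cs)).mp (by simp [pvIdx, h1, h2]))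
        (by simp [h])
    · have hm : a ∈ cs := by
        rcases List.mem_cons.mp h with h' | h'
        · exact absurd h'.symm h1
        · exact h'
      obtain ⟨hget, hmin⟩ := ih hm
      have hnn : 0 ≤ pvIdx a cs := by have := neg_one_le_pvIdx a cs; omega
      have ht : (pvIdx a cs + 1).toNat = (pvIdx a cs).toNat + 1 := by omega
      rw [ht]
      refine ⟨by simpa using hget, ?_⟩
      intro i hi
      cases i with
      | zero => simp; exact fun he => h1 he
      | succ j => simpa using hmin j (by omega)

-- [a] is a prefix of t iff t starts with a
theorem prefix_single_iff (a : Char) (t : List Char) : [a] <+: t ↔ t.head? = some a := by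
  constructor
  · rintro ⟨r, rfl⟩; rfl
  · intro h
    cases t with
    | nil => simp at h
    | cons c cs => simp at h; subst h; exact ⟨cs, rfl⟩

theorem find_single (a : Char) (l : List Char) : PySem.Chars.find l [a] = pvIdx a l := by
  by_cases hm : a ∈ l
  · have hinf : [a] <:+: l := by
      obtain ⟨s, t, rfl⟩ := List.append_of_mem hm
      exact ⟨s, t, by simp⟩
    have hnn : 0 ≤ PySem.Chars.find l [a] := (PySem.Chars.find_nonneg_iff _ _).mpr hinf
    obtain ⟨hpre, hmin⟩ := PySem.Chars.find_spec hnn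
    obtain ⟨hget, hmin'⟩ := pvIdx_spec a l hm
    have hnn' : 0 ≤ pvIdx a l := by
      have := (pvIdx_eq_neg_one_iff a l).not.mpr (by simp [hm])
      have := neg_one_le_pvIdx a l; omega
    have h1 : l[(PySem.Chars.find l [a]).toNat]? = some a := by
      rw [← List.head?_drop]; exact (prefix_single_iff a _).mp hpre
    have heq : (PySem.Chars.find l [a]).toNat = (pvIdx a l).toNat := by
      rcases Nat.lt_trichotomy (PySem.Chars.find l [a]).toNat (pvIdx a l).toNat with h | h | h
      · exact absurd h1 (hmin' _ h)
      · exact h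
      · exact absurd ((prefix_single_iff a _).mpr (by rw [List.head?_drop]; exact hget))
          (hmin _ h)
    omega
  · rw [(PySem.Chars.find_eq_neg_one_iff _ _).mpr (fun hinf => hm (hinf.subset (by simp))), (pvIdx_eq_neg_one_iff a l).mpr hm]

theorem pvSkipA_not_mem (q : Char) (l : List Char) (h : q ∉ l) : pvSkipA q l = [] := by
  induction l with
  | nil => rfl
  | cons c cs ih =>
    simp only [pvSkipA]
    rw [if_neg (by intro he; exact h (by simp [he]))]
    exact ih (fun hm => h (by simp [hm]))

theorem pvSkipA_mem (q : Char) (l : List Char) (h : q ∈ l) :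
    pvSkipA q l = l.drop ((pvIdx q l).toNat + 1) := by
  induction l with
  | nil => simp at h
  | cons c cs ih =>
    simp only [pvSkipA, pvIdx]
    split_ifs with h1 h2
    · subst h1; simp
    · exact absurd ((pvIdx_eq_neg_one_iff q (c :: cs)).mp (by simp [pvIdx, h1, h2]))
        (by simp [h])
    · have hm : q ∈ cs := by
        rcases List.mem_cons.mp h with h' | h'
        · exact absurd h'.symm h1
        · exact h'
      have hnn : 0 ≤ pvIdx q cs := by
        have := (pvIdx_eq_neg_one_iff q cs).not.mpr (by simp [hm])
        have := neg_one_le_pvIdx q cs; omega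
      rw [ih hm]
      have : (pvIdx q cs + 1).toNat + 1 = ((pvIdx q cs).toNat + 1) + 1 := by omega
      rw [this, List.drop_succ_cons]

theorem pvIdx_lt_length (a : Char) (l : List Char) (h : a ∈ l) :
    (pvIdx a l).toNat < l.length := by
  have := (pvIdx_spec a l h).1
  exact (List.getElem?_eq_some_iff.mp this).1

-- shifting a non-quote head past B's chunk machinery
theorem pvStripB_tail_shift (c : Char) (cs : List Char) (q : Int) (h0 : 0 ≤ q)
    (hlt : q.toNat < cs.length) :
    (let quote := (c :: cs).getD (q + 1).toNat ' ';
     let close := PySem.Chars.findFrom (c :: cs) [quote] ((q + 1) + 1) none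
     if close = -1 then (c :: cs).take (q + 1).toNat
     else (c :: cs).take (q + 1).toNat ++ pvStripB ((c :: cs).drop (close.toNat + 1)))
    = c :: (let quote := cs.getD q.toNat ' ';
       let close := PySem.Chars.findFrom cs [quote] (q + 1) none
       if close = -1 then cs.take q.toNat
       else cs.take q.toNat ++ pvStripB (cs.drop (close.toNat + 1))) := by
  have ht1 : (q + 1).toNat = q.toNat + 1 := by omega
  simp only [ht1, List.getD_cons_succ]
  have hc2 : q + 1 + 1 = ((q.toNat + 2 : Nat) : Int) := by omega
  have hc1 : q + 1 = ((q.toNat + 1 : Nat) : Int) := by omega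
  rw [hc2, PySem.Chars.findFrom_natCast _ _ _ (by simp; omega),
      hc1, PySem.Chars.findFrom_natCast _ _ _ (by omega)]
  have hdrop : (c :: cs).drop (q.toNat + 2) = cs.drop (q.toNat + 1) := rfl
  rw [hdrop]
  set r := PySem.Chars.find (cs.drop (q.toNat + 1)) [cs.getD q.toNat ' '] with hr
  have hrge : -1 ≤ r := by rw [hr, find_single]; exact neg_one_le_pvIdx _ _
  by_cases h : r = -1
  · simp [h, List.take_succ_cons]
  · rw [if_neg h, if_neg h]
    rw [if_neg (by omega), if_neg (by omega)]
    have htn : (((q.toNat + 2 : Nat) : Int) + r).toNat + 1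
        = ((((q.toNat + 1 : Nat) : Int) + r).toNat + 1) + 1 := by omega
    rw [htn, List.take_succ_cons, List.drop_succ_cons, List.cons_append]

-- B on a non-quote head: keep the char, recurse on the tail
theorem pvStripB_cons (c : Char) (cs : List Char) (hc1 : ¬c = '\'') (hc2 : ¬c = '"') :
    pvStripB (c :: cs) = c :: pvStripB cs := by
  conv_lhs => rw [pvStripB]
  conv_rhs => rw [pvStripB]
  simp only [find_single]
  have ha : pvIdx '\'' (c :: cs) = if pvIdx '\'' cs = -1 then -1 else pvIdx '\'' cs + 1 := by
    simp [pvIdx, hc1]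
  have hb : pvIdx '"' (c :: cs) = if pvIdx '"' cs = -1 then -1 else pvIdx '"' cs + 1 := by
    simp [pvIdx, hc2]
  simp only [ha, hb]
  have hja := neg_one_le_pvIdx '\'' cs
  have hjb := neg_one_le_pvIdx '"' cs
  by_cases h1 : pvIdx '\'' cs = -1 <;> by_cases h2 : pvIdx '"' cs = -1
  · simp [h1, h2]
  · have e1 : ¬(pvIdx '"' cs + 1 = -1) := by omega
    simp only [h1, h2, e1, if_true, if_false, ite_true, ite_false, if_pos, if_neg,
      reduceIte, dite_eq_ite, true_and, false_and, and_true, and_false]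
    exact pvStripB_tail_shift c cs _ (by omega)
      (pvIdx_lt_length _ _ (by_contra fun hm => h2 ((pvIdx_eq_neg_one_iff _ _).mpr hm)))
  · have e1 : ¬(pvIdx '\'' cs + 1 = -1) := by omega
    simp only [h1, h2, e1, if_true, if_false, ite_true, ite_false, if_pos, if_neg,
      reduceIte, dite_eq_ite, true_and, false_and, and_true, and_false]
    exact pvStripB_tail_shift c cs _ (by omega)
      (pvIdx_lt_length _ _ (by_contra fun hm => h1 ((pvIdx_eq_neg_one_iff _ _).mpr hm)))
  · have e1 : ¬(pvIdx '\'' cs + 1 = -1) := by omega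
    have e2 : ¬(pvIdx '"' cs + 1 = -1) := by omega
    have hmin : min (pvIdx '\'' cs + 1) (pvIdx '"' cs + 1)
        = min (pvIdx '\'' cs) (pvIdx '"' cs) + 1 := by omega
    simp only [h1, h2, e1, e2, if_true, if_false, ite_true, ite_false, reduceIte, hmin,
      true_and, false_and, and_true, and_false]
    refine pvStripB_tail_shift c cs _ (by omega) ?_
    rcases min_cases (pvIdx '\'' cs) (pvIdx '"' cs) with ⟨he, _⟩ | ⟨he, _⟩ <;> rw [he]
    · exact pvIdx_lt_length _ _ (by_contra fun hm => h1 ((pvIdx_eq_neg_one_iff _ _).mpr hm))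
    · exact pvIdx_lt_length _ _ (by_contra fun hm => h2 ((pvIdx_eq_neg_one_iff _ _).mpr hm))

-- B on a quote head: drop everything up to (and with) the matching quote
theorem pvStripB_quote_head (a : Char) (cs : List Char) (ha : a = '\'' ∨ a = '"') :
    pvStripB (a :: cs)
      = if a ∈ cs then pvStripB (cs.drop ((pvIdx a cs).toNat + 1)) else [] := by
  have hone : (0 : Int) + 1 = ((1 : Nat) : Int) := by norm_num
  conv_lhs => rw [pvStripB]
  simp only [find_single]
  have hj := neg_one_le_pvIdx a cs
  rcases ha with rfl | rfl
  · have h0 : pvIdx '\'' ('\'' :: cs) = 0 := by simp [pvIdx]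
    have hb : pvIdx '"' ('\'' :: cs) = if pvIdx '"' cs = -1 then -1 else pvIdx '"' cs + 1 := by
      simp [pvIdx]
    have hjb := neg_one_le_pvIdx '"' cs
    rw [h0, hb, dif_neg (by simp)]
    have hq : (if (if pvIdx '"' cs = -1 then (-1 : Int) else pvIdx '"' cs + 1) = -1 then (0 : Int)
        else if (0 : Int) = -1 then (if pvIdx '"' cs = -1 then (-1 : Int) else pvIdx '"' cs + 1)
        else min 0 (if pvIdx '"' cs = -1 then (-1 : Int) else pvIdx '"' cs + 1)) = 0 := by
      split_ifs <;> first | omega | exact absurd rfl (by assumption) | exact (by assumption : False).elim | (rw [min_def]; split_ifs <;> omega)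
    rw [hq]
    simp only [Int.toNat_zero, List.getD_cons_zero, List.take_zero, List.nil_append]
    rw [hone, PySem.Chars.findFrom_natCast _ _ _ (by simp), List.drop_succ_cons, List.drop_zero,
        find_single]
    by_cases hm : pvIdx '\'' cs = -1
    · rw [if_pos hm, if_pos rfl, if_neg ((pvIdx_eq_neg_one_iff _ _).mp hm)]
    · rw [if_neg hm, if_neg (by have := neg_one_le_pvIdx '\'' cs; omega),
          if_pos (by_contra fun hn => hm ((pvIdx_eq_neg_one_iff _ _).mpr hn))]
      have : (((1 : Nat) : Int) + pvIdx '\'' cs).toNat + 1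
          = ((pvIdx '\'' cs).toNat + 1) + 1 := by have := neg_one_le_pvIdx '\'' cs; omega
      rw [this, List.drop_succ_cons]
  · have h0 : pvIdx '"' ('"' :: cs) = 0 := by simp [pvIdx]
    have hb : pvIdx '\'' ('"' :: cs) = if pvIdx '\'' cs = -1 then -1 else pvIdx '\'' cs + 1 := by
      simp [pvIdx]
    have hjb := neg_one_le_pvIdx '\'' cs
    rw [h0, hb, dif_neg (by simp)]
    have hq : (if (0 : Int) = -1 then (if pvIdx '\'' cs = -1 then (-1 : Int) else pvIdx '\'' cs + 1)
        else if (if pvIdx '\'' cs = -1 then (-1 : Int) else pvIdx '\'' cs + 1) = -1 then (0 : Int)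
        else min (if pvIdx '\'' cs = -1 then (-1 : Int) else pvIdx '\'' cs + 1) 0) = 0 := by
      split_ifs <;> first | omega | exact absurd rfl (by assumption) | exact (by assumption : False).elim | (rw [min_def]; split_ifs <;> omega)
    rw [hq]
    simp only [Int.toNat_zero, List.getD_cons_zero, List.take_zero, List.nil_append]
    rw [hone, PySem.Chars.findFrom_natCast _ _ _ (by simp), List.drop_succ_cons, List.drop_zero,
        find_single]
    by_cases hm : pvIdx '"' cs = -1
    · rw [if_pos hm, if_pos rfl, if_neg ((pvIdx_eq_neg_one_iff _ _).mp hm)]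
    · rw [if_neg hm, if_neg (by have := neg_one_le_pvIdx '"' cs; omega),
          if_pos (by_contra fun hn => hm ((pvIdx_eq_neg_one_iff _ _).mpr hn))]
      have : (((1 : Nat) : Int) + pvIdx '"' cs).toNat + 1
          = ((pvIdx '"' cs).toNat + 1) + 1 := by have := neg_one_le_pvIdx '"' cs; omega
      rw [this, List.drop_succ_cons]

theorem strip_le (n : Nat) : ∀ l : List Char, l.length ≤ n → pvStripA l = pvStripB l := by
  induction n with
  | zero =>
    intro l hl
    have : l = [] := by cases l with | nil => rfl | cons c cs => simp at hl
    subst this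
    rw [pvStripA, pvStripB]
    simp [find_single, pvIdx]
  | succ n ih =>
    intro l hl
    cases l with
    | nil =>
      rw [pvStripA, pvStripB]
      simp [find_single, pvIdx]
    | cons c cs =>
      simp only [List.length_cons] at hl
      by_cases hc1 : c = '\''
      · subst hc1
        rw [pvStripA, if_pos rfl, pvStripB_quote_head _ _ (Or.inl rfl)]
        by_cases hm : '\'' ∈ cs
        · rw [if_pos hm, pvSkipA_mem _ _ hm]
          exact ih _ (by simp only [List.length_drop]; omega)
        · rw [if_neg hm, pvSkipA_not_mem _ _ hm, pvStripA]
      · by_cases hc2 : c = '"'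
        · subst hc2
          rw [pvStripA, if_neg hc1, if_pos rfl, pvStripB_quote_head _ _ (Or.inr rfl)]
          by_cases hm : '"' ∈ cs
          · rw [if_pos hm, pvSkipA_mem _ _ hm]
            exact ih _ (by simp only [List.length_drop]; omega)
          · rw [if_neg hm, pvSkipA_not_mem _ _ hm, pvStripA]
        · rw [pvStripA, if_neg hc1, if_neg hc2, pvStripB_cons c cs hc1 hc2,
              ih cs (by omega)]

theorem strip_eq (l : List Char) : pvStripA l = pvStripB l :=
  strip_le l.length l (Nat.le_refl _)

-- ===== VERDICT (by name: the statement is the Claim_ definition above) =====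
theorem do_string_spec : Claim_equal_do_string := by
  intro s _
  show _ = _
  unfold do_string do_string_alt
  rw [strip_eq]
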